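-- pv_equiv track=rewrite | github.com/Lev-Excellenteam-2023/exercise1-yammesika-week-5-eededeedencohen | _part5.3/all_IDs.py | get_full_id
-- ===== SOURCE A (Python) =====
-- def get_full_id(id_number):
--     id_number = str(id_number) # validate that the input is a string
--     sum_digits = 0
--     for index, digit in enumerate(id_number):
--         if index % 2 == 0:
--             sum_digits += int(digit)
--         else:
--             sum_digits += int(digit) * 2
--     last_digit = 10 - sum_digits % 10 -1
--     return id_number + str(last_digit)
-- ===== SOURCE B (Python) =====
-- def _weighted(ds):
--     if not ds:
--         return 0
--     if len(ds) == 1: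
--         return ds[0]
--     return ds[0] + 2 * ds[1] + _weighted(ds[2:])
--
--
-- def get_full_id(id_number):
--     id_number = str(id_number)
--     total = _weighted([int(c) for c in id_number])
--     return id_number + str(9 - total % 10)
-- ===== Notes on version B (the rewrite author's own statement) =====
-- stated objective: alternative
-- what changed: Replaces the enumerate loop with an index-parity branch by a recursion that consumes the digit list two at a time (a unit-weighted plus a double-weighted digit per step) and folds the check-digit subtraction into a single constant.
import Mathlib
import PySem

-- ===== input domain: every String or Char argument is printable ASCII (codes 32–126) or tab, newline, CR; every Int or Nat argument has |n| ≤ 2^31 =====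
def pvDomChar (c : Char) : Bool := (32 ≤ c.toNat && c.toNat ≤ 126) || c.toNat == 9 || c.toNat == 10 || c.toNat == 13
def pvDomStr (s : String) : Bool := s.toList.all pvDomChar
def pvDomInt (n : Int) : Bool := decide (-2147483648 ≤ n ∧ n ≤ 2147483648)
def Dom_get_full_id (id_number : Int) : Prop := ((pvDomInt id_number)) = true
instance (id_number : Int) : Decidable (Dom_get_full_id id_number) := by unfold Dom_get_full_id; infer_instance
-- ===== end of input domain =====

-- B consumes the digit list two at a time by structural recursion instead of an
-- enumerate loop with an index-parity branch; same cost, different decomposition.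


-- int(c) for a single character c (both Pythons apply int to one-character strings)
def pyIntChar (c : Char) : Int := (PySem.Int.ofChars? [c]).getD 0

-- ===== PORT A =====
def get_full_id (id_number : Int) : String :=
  let s := PySem.Int.toChars id_number
  let sum_digits := (PySem.List.enumerate s 0).foldl
    (fun acc p => if PySem.Int.mod p.1 2 = 0 then acc + pyIntChar p.2 else acc + pyIntChar p.2 * 2) 0
  let last_digit := 10 - PySem.Int.mod sum_digits 10 - 1
  String.ofList (s ++ PySem.Int.toChars last_digit)

-- ===== PORT B =====
def weightedB : List Int → Int
  | [] => 0
  | [a] => a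
  | a :: b :: rest => a + 2 * b + weightedB rest

def get_full_id_alt (id_number : Int) : String :=
  let s := PySem.Int.toChars id_number
  let total := weightedB (s.map pyIntChar)
  String.ofList (s ++ PySem.Int.toChars (9 - PySem.Int.mod total 10))

-- ===== PRECONDITION & SPEC =====
-- Pre_ excludes negative inputs: on them str(id_number) starts with '-' and A raises ValueError at int('-').
def Pre_get_full_id (id_number : Int) : Prop := 0 ≤ id_number
instance (id_number : Int) : Decidable (Pre_get_full_id id_number) := by unfold Pre_get_full_id; infer_instance
def pvWitness_get_full_id : Int := 123456789

def Spec_get_full_id (id_number : Int) (out : String) : Prop := out = get_full_id_alt id_number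
instance (id_number : Int) (out : String) : Decidable (Spec_get_full_id id_number out) := by unfold Spec_get_full_id; infer_instance

-- ===== CLAIM (what is proved, stated in full; the proofs are below) =====
def Claim_equal_get_full_id : Prop := ∀ (id_number : Int), Dom_get_full_id id_number → Pre_get_full_id id_number → Spec_get_full_id id_number (get_full_id id_number)

-- ===== LEMMAS AND PROOFS =====

-- recursion skeleton for two-at-a-time induction over a char list (proof-only helper)
def twoStep : List Char → Unit
  | [] => ()
  | [_] => ()
  | _ :: _ :: rest => twoStep rest

-- A's interleaved parity loop, started at any even index, computes B's two-at-a-time recursion.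
lemma foldA_eq_weightedB (ds : List Char) (n : Nat) (acc : Int) :
    (PySem.List.enumerate ds (2 * (n : Int))).foldl
      (fun acc p => if PySem.Int.mod p.1 2 = 0 then acc + pyIntChar p.2 else acc + pyIntChar p.2 * 2) acc
    = acc + weightedB (ds.map pyIntChar) := by
  induction ds using twoStep.induct generalizing n acc with
  | case1 => simp [PySem.List.enumerate_nil, weightedB]
  | case2 a =>
      have h0 : PySem.Int.mod (2 * (n : Int)) 2 = 0 := by
        rw [PySem.Int.mod_eq_emod_of_pos (by norm_num)]; omega
      simp [PySem.List.enumerate_cons, PySem.List.enumerate_nil, weightedB]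
  | case3 a b rest ih =>
      have h0 : PySem.Int.mod (2 * (n : Int)) 2 = 0 := by
        rw [PySem.Int.mod_eq_emod_of_pos (by norm_num)]; omega
      have h1 : ¬ PySem.Int.mod (2 * (n : Int) + 1) 2 = 0 := by
        rw [PySem.Int.mod_eq_emod_of_pos (by norm_num)]; omega
      have hstep : (2 : Int) * (n : Int) + 1 + 1 = 2 * ((n + 1 : Nat) : Int) := by push_cast; ring
      simp only [PySem.List.enumerate_cons, List.foldl_cons, h0, h1, if_true, if_false, hstep]
      rw [ih (n + 1)]
      simp [weightedB]; ring

-- ===== VERDICT (by name: the statement is the Claim_ definition above) =====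
theorem get_full_id_spec : Claim_equal_get_full_id := by
  intro id_number _ _
  unfold Spec_get_full_id get_full_id get_full_id_alt
  have h := foldA_eq_weightedB (PySem.Int.toChars id_number) 0 0
  simp only [Nat.cast_zero, mul_zero, zero_add] at h
  simp only [h]
  congr 2
  have : (10 : Int) - PySem.Int.mod (weightedB ((PySem.Int.toChars id_number).map pyIntChar)) 10 - 1
       = 9 - PySem.Int.mod (weightedB ((PySem.Int.toChars id_number).map pyIntChar)) 10 := by ring
  rw [this]
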